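-- pv_equiv track=rewrite | github.com/amv69/BIOSC1640 | flask/backEnd/python/oligo.py | wildcard_stats
-- ===== SOURCE A (Python) =====
-- iupac_wc = {'A': ('A',),
--             'C': ('C',),
--             'G': ('G',),
--             'T': ('T',),
--     'R': ('A', 'G'),
--     'Y': ('C', 'T'),
--     'S': ('C', 'G'),
--     'W': ('A', 'T'),
--     'K': ('G', 'T'),
--     'M': ('A', 'C'),
--     'B': ('C', 'G', 'T'),
--     'D': ('A', 'G', 'T'),
--     'H': ('A', 'C', 'T'),
--     'V': ('A', 'C', 'G'),
--     'N': ('A', 'C', 'G', 'T')}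
--
-- def wildcard_stats(seq):
--     """
--     Returns number of wildcard positions and number of possible
--     expansions
--     """
--
--     wc_count = 0
--     expansions = 1
--     for base in seq:
--         if base not in ['A', 'C', 'G', 'T', 'X']:
--             wc_count += 1
--             expansions *= len(iupac_wc.get(base, ()))
--     return seq.count('X'), wc_count, expansions
-- ===== SOURCE B (Python) =====
-- iupac_wc = {'A': ('A',),
--             'C': ('C',),
--             'G': ('G',),
--             'T': ('T',),
--     'R': ('A', 'G'),
--     'Y': ('C', 'T'),
--     'S': ('C', 'G'),
--     'W': ('A', 'T'),
--     'K': ('G', 'T'),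
--     'M': ('A', 'C'),
--     'B': ('C', 'G', 'T'),
--     'D': ('A', 'G', 'T'),
--     'H': ('A', 'C', 'T'),
--     'V': ('A', 'C', 'G'),
--     'N': ('A', 'C', 'G', 'T')}
--
--
-- def wildcard_stats(seq):
--     """
--     Returns number of wildcard positions and number of possible
--     expansions
--     """
--     counts = {}
--     for base in seq:
--         counts[base] = counts.get(base, 0) + 1
--     wc_count = 0
--     expansions = 1
--     for base, n in counts.items():
--         if base not in 'ACGTX':
--             wc_count += n
--             expansions *= len(iupac_wc.get(base, ())) ** n
--     return counts.get('X', 0), wc_count, expansions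
-- ===== Notes on version B (the rewrite author's own statement) =====
-- stated objective: faster
-- what changed: B builds a frequency table of the sequence in one pass and then aggregates per DISTINCT base (adding counts and multiplying len(expansion)**count), instead of A's per-character list-membership test and multiply plus a separate substring-count scan.
import Mathlib
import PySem

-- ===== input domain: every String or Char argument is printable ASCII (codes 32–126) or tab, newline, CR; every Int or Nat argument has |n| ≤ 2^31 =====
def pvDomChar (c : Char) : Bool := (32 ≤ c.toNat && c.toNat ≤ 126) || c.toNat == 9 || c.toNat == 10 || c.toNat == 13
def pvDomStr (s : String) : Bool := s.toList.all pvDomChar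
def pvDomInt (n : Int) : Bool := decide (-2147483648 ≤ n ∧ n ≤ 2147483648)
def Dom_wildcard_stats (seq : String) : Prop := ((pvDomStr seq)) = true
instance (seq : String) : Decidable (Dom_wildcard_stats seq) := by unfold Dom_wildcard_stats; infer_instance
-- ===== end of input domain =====

-- B aggregates per distinct base from a one-pass frequency table (adding counts, multiplying powers)
-- instead of A's per-character accumulation plus a separate seq.count('X') scan; same return value.

-- shared module-level constant iupac_wc (tuples ported as lists; both Pythons read it)
def iupac_wc : PySem.Dict Char (List Char) :=
  PySem.Dict.ofList [('A', ['A']), ('C', ['C']), ('G', ['G']), ('T', ['T']),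
    ('R', ['A', 'G']), ('Y', ['C', 'T']), ('S', ['C', 'G']), ('W', ['A', 'T']),
    ('K', ['G', 'T']), ('M', ['A', 'C']), ('B', ['C', 'G', 'T']), ('D', ['A', 'G', 'T']),
    ('H', ['A', 'C', 'T']), ('V', ['A', 'C', 'G']), ('N', ['A', 'C', 'G', 'T'])]

-- ===== PORT A =====
def wildcard_stats (seq : String) : Int × Int × Int :=
  let r := seq.toList.foldl
    (fun (st : Int × Int) base =>
      if base ∉ ['A', 'C', 'G', 'T', 'X'] then
        (st.1 + 1, st.2 * ((iupac_wc.getD base []).length : Int))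
      else st)
    (0, 1)
  ((PySem.Str.count seq "X" : Int), r.1, r.2)

-- ===== PORT B =====
def wildcard_stats_alt (seq : String) : Int × Int × Int :=
  let counts : PySem.Dict Char Int :=
    seq.toList.foldl (fun d base => d.insert base (d.getD base 0 + 1)) PySem.Dict.empty
  let r := counts.items.foldl
    (fun (st : Int × Int) p =>
      if ¬ PySem.Str.isIn (String.ofList [p.1]) "ACGTX" = true then
        -- '** n': the count n is nonnegative by construction, so the Nat power is exact
        (st.1 + p.2, st.2 * ((iupac_wc.getD p.1 []).length : Int) ^ p.2.toNat)
      else st)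
    (0, 1)
  (counts.getD 'X' 0, r.1, r.2)

-- ===== PRECONDITION & SPEC =====
def Spec_wildcard_stats (seq : String) (out : Int × Int × Int) : Prop := out = wildcard_stats_alt seq
instance (seq : String) (out : Int × Int × Int) : Decidable (Spec_wildcard_stats seq out) := by unfold Spec_wildcard_stats; infer_instance

-- ===== CLAIM (what is proved, stated in full; the proofs are below) =====
def Claim_equal_wildcard_stats : Prop := ∀ (seq : String), Dom_wildcard_stats seq → Spec_wildcard_stats seq (wildcard_stats seq)

-- ===== LEMMAS AND PROOFS =====

-- Python 'c in L' for a single char is char membership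
theorem isIn_single (c : Char) (L : List Char) :
    PySem.Chars.isIn [c] L = decide (c ∈ L) := by
  cases h : PySem.Chars.isIn [c] L with
  | false =>
    have := (PySem.Chars.isIn_eq_false_iff [c] L).mp h
    rw [List.singleton_infix_iff] at this
    simp [this]
  | true =>
    have := (PySem.Chars.isIn_iff_infix [c] L).mp h
    rw [List.singleton_infix_iff] at this
    simp [this]

-- s.count(t) for a one-char pattern t is List.count
theorem count_go_single (c : Char) (fuel : Nat) (l : List Char) (acc : Nat)
    (h : l.length ≤ fuel) :
    PySem.Chars.count.go [c] fuel l acc = acc + l.count c := by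
  induction fuel generalizing l acc with
  | zero =>
    have : l = [] := List.length_eq_zero_iff.mp (Nat.le_zero.mp h)
    subst this; simp [PySem.Chars.count.go]
  | succ n ih =>
    cases l with
    | nil => simp [PySem.Chars.count.go]
    | cons x t =>
      simp only [PySem.Chars.count.go]
      have ht : t.length ≤ n := by simpa using h
      by_cases hc : c = x
      · subst hc
        simp only [List.isPrefixOf, BEq.rfl, Bool.true_and,
          if_true]
        simp only [List.length_cons, List.length_nil, List.drop_succ_cons, List.drop_zero]
        rw [ih _ _ ht, List.count_cons_self]
        omega
      · have hpre : [c].isPrefixOf (x :: t) = false := by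
          simp only [List.isPrefixOf, Bool.and_true]
          exact beq_eq_false_iff_ne.mpr hc
        rw [hpre]
        simp only [if_false, Bool.false_eq_true]
        rw [ih _ _ ht, List.count_cons_of_ne (Ne.symm hc)]

theorem count_single (s : List Char) (c : Char) :
    PySem.Chars.count s [c] = s.count c := by
  simpa [PySem.Chars.count] using count_go_single c s.length s 0 (le_refl _)

-- ∑ over the list of f = ∑ over distinct elements of count * f
theorem sum_dedup (l : List Char) (f : Char → Int) :
    (l.map f).sum = ((PySem.List.dedup l).map (fun c => (l.count c : Int) * f c)).sum := by
  have h1 := Finset.sum_list_map_count l f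
  have hnd : (PySem.List.dedup l).Nodup := PySem.List.nodup_dedup l
  have hfs : (PySem.List.dedup l).toFinset = l.toFinset := by
    ext x; simp
  have h2 := List.sum_toFinset (l := PySem.List.dedup l) (fun c => (l.count c : Int) * f c) hnd
  rw [h1, ← h2, hfs]
  apply Finset.sum_congr rfl
  intro x _
  simp

-- ∏ over the list of f = ∏ over distinct elements of f ^ count
theorem prod_dedup (l : List Char) (f : Char → Int) :
    (l.map f).prod = ((PySem.List.dedup l).map (fun c => f c ^ l.count c)).prod := by
  have h1 := Finset.prod_list_map_count l f
  have hnd : (PySem.List.dedup l).Nodup := PySem.List.nodup_dedup l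
  have hfs : (PySem.List.dedup l).toFinset = l.toFinset := by
    ext x; simp
  have h2 := List.prod_toFinset (l := PySem.List.dedup l) (fun c => f c ^ l.count c) hnd
  rw [h1, ← h2, hfs]

-- a guarded accumulate-loop is a map-sum / map-prod pair
theorem foldl_pair_sum_prod {α : Type} (l : List α) (P : α → Prop) [DecidablePred P]
    (g : α → Int) (w : α → Int) :
    l.foldl (fun (st : Int × Int) x =>
        if P x then (st.1 + g x, st.2 * w x) else st) (0, 1)
      = ((l.map (fun x => if P x then g x else 0)).sum,
         (l.map (fun x => if P x then w x else 1)).prod) := by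
  have key : ∀ (a b : Int), l.foldl (fun (st : Int × Int) x =>
        if P x then (st.1 + g x, st.2 * w x) else st) (a, b)
      = (a + (l.map (fun x => if P x then g x else 0)).sum,
         b * (l.map (fun x => if P x then w x else 1)).prod) := by
    induction l with
    | nil => simp
    | cons x t ih =>
      intro a b
      simp only [List.foldl_cons, List.map_cons, List.sum_cons, List.prod_cons]
      by_cases hp : P x
      · simp only [hp, if_true, ih, Prod.mk.injEq]
        exact ⟨by ring, by ring⟩
      · simp only [hp, if_false, ih, zero_add, one_mul]
  simpa using key 0 1

-- ===== VERDICT (by name: the statement is the Claim_ definition above) =====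
theorem wildcard_stats_spec : Claim_equal_wildcard_stats := by
  intro seq _
  unfold Spec_wildcard_stats wildcard_stats wildcard_stats_alt
  show ((PySem.Str.count seq "X" : Int),
      (seq.toList.foldl
        (fun (st : Int × Int) base =>
          if base ∉ ['A', 'C', 'G', 'T', 'X'] then
            (st.1 + 1, st.2 * ((iupac_wc.getD base []).length : Int))
          else st) (0, 1)).1,
      (seq.toList.foldl
        (fun (st : Int × Int) base =>
          if base ∉ ['A', 'C', 'G', 'T', 'X'] then
            (st.1 + 1, st.2 * ((iupac_wc.getD base []).length : Int))
          else st) (0, 1)).2)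
    = ((PySem.Dict.counter seq.toList).getD 'X' 0,
      ((PySem.Dict.counter seq.toList).items.foldl
        (fun (st : Int × Int) p =>
          if ¬ PySem.Str.isIn (String.ofList [p.1]) "ACGTX" = true then
            (st.1 + p.2, st.2 * ((iupac_wc.getD p.1 []).length : Int) ^ p.2.toNat)
          else st) (0, 1)).1,
      ((PySem.Dict.counter seq.toList).items.foldl
        (fun (st : Int × Int) p =>
          if ¬ PySem.Str.isIn (String.ofList [p.1]) "ACGTX" = true then
            (st.1 + p.2, st.2 * ((iupac_wc.getD p.1 []).length : Int) ^ p.2.toNat)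
          else st) (0, 1)).2)
  rw [PySem.Dict.items_counter, PySem.Dict.getD_counter]
  set l := seq.toList with hl
  rw [foldl_pair_sum_prod l (fun c => c ∉ ['A','C','G','T','X'])
    (fun _ => (1 : Int)) (fun c => ((iupac_wc.getD c []).length : Int))]
  rw [foldl_pair_sum_prod ((PySem.Set.ofList l).map (fun k => (k, (l.count k : Int))))
    (fun p => ¬ PySem.Str.isIn (String.ofList [p.1]) "ACGTX" = true)
    (fun p => p.2)
    (fun p => ((iupac_wc.getD p.1 []).length : Int) ^ p.2.toNat)]
  refine Prod.ext ?_ (Prod.ext ?_ ?_)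
  · -- seq.count('X') = counter lookup
    show (PySem.Str.count seq "X" : Int) = (l.count 'X' : Int)
    rw [PySem.Str.count_eq]
    simp only [← hl]
    have hxs : ("X" : String).toList = ['X'] := rfl
    rw [hxs, count_single]
  · -- wildcard count
    show (l.map (fun c => if c ∉ ['A','C','G','T','X'] then (1:Int) else 0)).sum = _
    rw [sum_dedup l (fun c => if c ∉ ['A','C','G','T','X'] then (1:Int) else 0)]
    simp only [List.map_map, PySem.List.dedup_eq_ofList]
    apply congrArg List.sum
    apply List.map_congr_left
    intro c _
    simp only [Function.comp_apply, PySem.Str.isIn_eq]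
    simp only [String.toList_ofList, isIn_single]
    have : ("ACGTX" : String).toList = ['A','C','G','T','X'] := rfl
    rw [this]
    by_cases hc : c ∈ ['A','C','G','T','X'] <;> simp [hc]
  · -- expansions
    show (l.map (fun c => if c ∉ ['A','C','G','T','X']
            then ((iupac_wc.getD c []).length : Int) else 1)).prod = _
    rw [prod_dedup l (fun c => if c ∉ ['A','C','G','T','X']
            then ((iupac_wc.getD c []).length : Int) else 1)]
    simp only [List.map_map, PySem.List.dedup_eq_ofList]
    apply congrArg List.prod
    apply List.map_congr_left
    intro c _
    simp only [Function.comp_apply, PySem.Str.isIn_eq]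
    simp only [String.toList_ofList, isIn_single]
    have h5 : ("ACGTX" : String).toList = ['A','C','G','T','X'] := rfl
    rw [h5]
    by_cases hc : c ∈ ['A','C','G','T','X'] <;> simp [hc, Int.toNat_natCast]
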